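-- pv_equiv track=rewrite | github.com/SZTankWang/dataStructure_2020Spring | recitation5/Recitation5 Python files/Spans.py | spans2
-- ===== SOURCE A (Python) =====
-- class ArrayStack:
--     ''' Stack implemented with python list append/pop'''
--     def __init__(self):
--         self.array = []
--
--     def __len__(self):
--         return len(self.array)
--
--     def is_empty(self):
--         return len(self.array) == 0
--
--     def push(self, e):
--         self.array.append(e)
--
--     def top(self):
--         if self.is_empty():
--             raise Empty()
--         return self.array[-1]
--
--     def pop(self):
--         if self.is_empty():
--             raise Empty()
--         return self.array.pop(-1)
--
--     def __repr__(self):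
--             return str(self.array)
--
-- def spans2(X):
--     '''
--     :param X: List[Int] -- list of integers.
--
--     Use a stack. We use the stack to compute the span distance.
--
--     If the top of the stack is “Smaller” than the next data,
--     top of the stack should be popped.
--
--     :return: list of span values.
--     '''
--     S = [0]* len(X)
--     A = ArrayStack()
--     for i in range(len(X)):   #O(n)
--         while A.is_empty() == False and X[A.top()] <= X[i]:
--             #The worst case of this while loop is run n time in one single loop, however,
--             #it's on the assumption that all previous index has not been poped, which means
--             #it should be a descendent sequence, that this while loop has not been operated before
--             #So the amortized runtime would still be n/n = 1
--             #Run time for this while loop: Amortized O(1)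
--             A.pop()
--         if A.is_empty():
--             S[i] = i+1
--         else:
--             S[i] = i - A.top()
--         A.push(i)
--     return S
-- ===== SOURCE B (Python) =====
-- def spans2(X):
--     '''Stock span via jumping over previously computed spans: no stack;
--     S[j] already tells how far to skip backwards.'''
--     n = len(X)
--     S = [0] * n
--     for i in range(n):
--         s = 1
--         j = i - 1
--         while j >= 0 and X[j] <= X[i]:
--             s += S[j]
--             j -= S[j]
--         S[i] = s
--     return S
-- ===== Notes on version B (the rewrite author's own statement) =====
-- stated objective: faster
-- what changed: Replaces A's auxiliary index stack (push/pop-while through a stack class) by the span-jumping technique: B keeps only the output array and finds the previous greater element by skipping backwards with the already-computed span values (j -= S[j]).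
import Mathlib
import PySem

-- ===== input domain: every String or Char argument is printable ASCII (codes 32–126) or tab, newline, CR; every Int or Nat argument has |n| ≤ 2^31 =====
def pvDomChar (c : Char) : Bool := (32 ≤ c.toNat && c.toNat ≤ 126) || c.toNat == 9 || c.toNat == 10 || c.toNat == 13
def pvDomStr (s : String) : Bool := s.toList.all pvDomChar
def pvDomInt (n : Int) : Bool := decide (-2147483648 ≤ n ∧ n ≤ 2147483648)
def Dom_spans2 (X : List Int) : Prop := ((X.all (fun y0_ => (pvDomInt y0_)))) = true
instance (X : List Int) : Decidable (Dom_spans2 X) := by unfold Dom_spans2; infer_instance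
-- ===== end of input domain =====

-- B replaces A's auxiliary index stack by the 'jump over previously computed spans'
-- technique (j -= S[j]); same return value, no stack.

-- ===== PORT A =====
-- A's inner while loop: pop stack indices whose value is <= X[i] (head = top of stack).
def popWhile (X : List Int) (xi : Int) : List Nat → List Nat
  | [] => []
  | t :: rest => if X.getD t 0 ≤ xi then popWhile X xi rest else t :: rest

-- one iteration of A's for loop: state = (S array, stack of indices)
def stepA (X : List Int) (st : List Int × List Nat) (i : Nat) : List Int × List Nat :=
  let stk := popWhile X (X.getD i 0) st.2
  let s := match stk with
    | [] => st.1.set i ((i : Int) + 1)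
    | t :: _ => st.1.set i ((i : Int) - (t : Int))
  (s, i :: stk)

def spans2 (X : List Int) : List Int :=
  ((List.range X.length).foldl (stepA X) (List.replicate X.length 0, [])).1

-- ===== PORT B =====
-- B's inner while loop: while j >= 0 and X[j] <= X[i]: s += S[j]; j -= S[j].
-- fuel only makes the recursion total; it never runs out on the states B reaches.
def jumpLoop (X S : List Int) (xi : Int) : Nat → Int → Int → Int
  | 0, s, _ => s
  | fuel + 1, s, j =>
    if j ≥ 0 ∧ X.getD j.toNat 0 ≤ xi then
      jumpLoop X S xi fuel (s + S.getD j.toNat 0) (j - S.getD j.toNat 0)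
    else s

-- one iteration of B's for loop: state = the S array only
def stepB (X : List Int) (S : List Int) (i : Nat) : List Int :=
  S.set i (jumpLoop X S (X.getD i 0) (i + 1) 1 ((i : Int) - 1))

def spans2_alt (X : List Int) : List Int :=
  (List.range X.length).foldl (stepB X) (List.replicate X.length 0)

-- ===== PRECONDITION & SPEC =====
def Spec_spans2 (X : List Int) (out : List Int) : Prop := out = spans2_alt X
instance (X : List Int) (out : List Int) : Decidable (Spec_spans2 X out) := by unfold Spec_spans2; infer_instance

-- ===== CLAIM (what is proved, stated in full; the proofs are below) =====
def Claim_equal_spans2 : Prop := ∀ (X : List Int), Dom_spans2 X → Spec_spans2 X (spans2 X)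

-- ===== LEMMAS AND PROOFS =====

-- reference: index of the nearest strictly greater element left of position t (-1 if none)
def backScan (X : List Int) (xi : Int) : Nat → Int
  | 0 => -1
  | j + 1 => if X.getD j 0 ≤ xi then backScan X xi j else (j : Int)

-- the span value both programs compute at index k
def fval (X : List Int) (k : Nat) : Int := (k : Int) - backScan X (X.getD k 0) k

lemma backScan_lb (X : List Int) (xi : Int) (t : Nat) : -1 ≤ backScan X xi t := by
  induction t with
  | zero => simp [backScan]
  | succ j ih => simp only [backScan]; split <;> omega

lemma backScan_lt (X : List Int) (xi : Int) (t : Nat) : backScan X xi t < (t : Int) := by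
  induction t with
  | zero => simp [backScan]
  | succ j ih => simp only [backScan]; split <;> push_cast <;> omega

lemma backScan_bound (X : List Int) (xi : Int) (t : Nat) (k : Nat)
    (h1 : backScan X xi t < (k : Int)) (h2 : k < t) : X.getD k 0 ≤ xi := by
  induction t with
  | zero => omega
  | succ j ih =>
    simp only [backScan] at h1
    split at h1
    · rcases Nat.lt_succ_iff_lt_or_eq.mp h2 with h | h
      · exact ih h1 h
      · subst h; assumption
    · omega

-- scanning skips over any block of elements ≤ xi
lemma backScan_skip (X : List Int) (xi : Int) :
    ∀ (t m : Nat), m ≤ t → (∀ k : Nat, m ≤ k → k < t → X.getD k 0 ≤ xi) →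
      backScan X xi t = backScan X xi m := by
  intro t
  induction t with
  | zero =>
    intro m h1 _
    have : m = 0 := by omega
    subst this; rfl
  | succ j ih =>
    intro m h1 h2
    rcases Nat.lt_succ_iff_lt_or_eq.mp (Nat.lt_succ_of_le h1) with hlt | heq
    · have hj : X.getD j 0 ≤ xi := h2 j (by omega) (by omega)
      rw [backScan, if_pos hj]
      exact ih m (by omega) (fun k hk1 hk2 => h2 k hk1 (by omega))
    · subst heq; rfl

-- ===== B-side: the jump loop computes the backward scan =====
lemma jumpLoop_eq (X S : List Int) (xi : Int) (i : Nat)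
    (hS : ∀ k : Nat, k < i → S.getD k 0 = fval X k) :
    ∀ (fuel : Nat) (j s : Int), -1 ≤ j → j < (i : Int) → (j + 1).toNat ≤ fuel →
      jumpLoop X S xi fuel s j = s + j - backScan X xi (j + 1).toNat := by
  intro fuel
  induction fuel with
  | zero =>
    intro j s h1 _ h3
    have hj : j = -1 := by omega
    subst hj
    show s = s + (-1) - backScan X xi ((-1 : Int) + 1).toNat
    norm_num [backScan]
  | succ f ih =>
    intro j s h1 h2 h3
    by_cases hj : 0 ≤ j
    · set jn := j.toNat with hjn
      have hjI : (jn : Int) = j := by omega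
      by_cases hc : X.getD jn 0 ≤ xi
      · simp only [jumpLoop]
        rw [← hjn, if_pos ⟨hj, hc⟩]
        have hjlt : jn < i := by omega
        have hSv := hS jn hjlt
        set p := backScan X (X.getD jn 0) jn with hp
        have hpl : -1 ≤ p := by rw [hp]; exact backScan_lb ..
        have hpu : p < (jn : Int) := by rw [hp]; exact backScan_lt ..
        have hfv : fval X jn = (jn : Int) - p := by rw [fval, hp]
        rw [hSv, hfv, show j - ((jn : Int) - p) = p from by omega]
        rw [ih p (s + ((jn : Int) - p)) hpl (by omega) (by omega)]
        have hskip : backScan X xi (j + 1).toNat = backScan X xi (p + 1).toNat := by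
          rw [show (j + 1).toNat = jn + 1 from by omega, backScan, if_pos hc]
          apply backScan_skip
          · omega
          · intro k hk1 hk2
            refine le_trans (backScan_bound X (X.getD jn 0) jn k ?_ hk2) hc
            rw [← hp]; omega
        rw [hskip]
        omega
      · simp only [jumpLoop]
        rw [← hjn, if_neg (by tauto)]
        rw [show (j + 1).toNat = jn + 1 from by omega, backScan, if_neg hc]
        omega
    · have hj1 : j = -1 := by omega
      subst hj1
      simp only [jumpLoop]
      rw [if_neg (by norm_num)]
      norm_num [backScan]

-- ===== A-side: the stack state and its relation to backScan =====
def stkF (X : List Int) : Nat → List Nat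
  | 0 => []
  | i + 1 => i :: popWhile X (X.getD i 0) (stkF X i)

lemma popWhile_popWhile (X : List Int) (u v : Int) (huv : u ≤ v) (l : List Nat) :
    popWhile X v (popWhile X u l) = popWhile X v l := by
  induction l with
  | nil => rfl
  | cons t rest ih =>
    by_cases h : X.getD t 0 ≤ u
    · rw [popWhile, if_pos h, ih, popWhile, if_pos (le_trans h huv)]
    · rw [popWhile, if_neg h]

-- the first surviving stack entry is exactly the nearest strictly greater index
lemma popWhile_stkF (X : List Int) : ∀ (i : Nat) (v : Int),
    (match popWhile X v (stkF X i) with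
      | [] => (-1 : Int)
      | t :: _ => (t : Int)) = backScan X v i := by
  intro i
  induction i with
  | zero => intro v; simp [stkF, popWhile, backScan]
  | succ i ih =>
    intro v
    by_cases h : X.getD i 0 ≤ v
    · simp only [stkF, popWhile, if_pos h, backScan, popWhile_popWhile X _ _ h]
      exact ih v
    · simp only [stkF, popWhile, if_neg h, backScan]

lemma set_map_range (n : Nat) (h : Nat → Int) (i : Nat) (x : Int) (_hi : i < n) :
    ((List.range n).map h).set i x
      = (List.range n).map (fun k => if k = i then x else h k) := by
  apply List.ext_getElem
  · simp
  · intro k hk1 hk2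
    simp only [List.length_map, List.length_range] at hk1 hk2
    simp only [List.getElem_set, List.getElem_map, List.getElem_range]
    by_cases hik : i = k
    · subst hik; simp
    · have h1 : ¬ k = i := fun h' => hik h'.symm
      simp [hik, h1]

lemma replicate_eq_map (n : Nat) (f : Nat → Int) :
    (List.replicate n (0 : Int)) = (List.range n).map (fun k => if k < 0 then f k else 0) := by
  rw [show (List.replicate n (0 : Int)) = (List.range n).map (fun _ => 0) from by
    simp [List.map_const']]
  apply List.map_congr_left
  intro k _
  simp

-- the if-table at stage i+1, rewritten from stage i with position i set
lemma map_step (X : List Int) (n i : Nat) (x : Int) (hi : i < n) (hx : x = fval X i) :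
    ((List.range n).map (fun k => if k < i then fval X k else 0)).set i x
      = (List.range n).map (fun k => if k < i + 1 then fval X k else 0) := by
  rw [set_map_range n _ i x hi]
  apply List.map_congr_left
  intro k _
  rcases Nat.lt_trichotomy k i with h | h | h
  · simp [Nat.ne_of_lt h, h, Nat.lt_succ_of_lt h]
  · subst h; simp [hx]
  · have h1 : ¬ k = i := by omega
    have h2 : ¬ k < i := by omega
    have h3 : ¬ k < i + 1 := by omega
    simp [h1, h2, h3]

-- A's fold invariant
lemma spans2_inv (X : List Int) :
    ∀ i : Nat, i ≤ X.length →
      (List.range i).foldl (stepA X) (List.replicate X.length 0, [])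
        = ((List.range X.length).map (fun k => if k < i then fval X k else 0), stkF X i) := by
  intro i
  induction i with
  | zero =>
    intro _
    simp only [List.range_zero, List.foldl_nil, stkF]
    rw [← replicate_eq_map X.length (fval X)]
  | succ i ih =>
    intro hle
    rw [List.range_succ, List.foldl_append, ih (by omega), List.foldl_cons, List.foldl_nil]
    have hkey := popWhile_stkF X i (X.getD i 0)
    rw [List.getD_eq_getElem?_getD] at hkey
    simp only [stepA, List.getD_eq_getElem?_getD]
    cases hstk : popWhile X (X[i]?.getD 0) (stkF X i) with
    | nil =>
      rw [hstk] at hkey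
      simp only [Prod.mk.injEq]
      refine ⟨?_, by simp [stkF, List.getD_eq_getElem?_getD, hstk]⟩
      exact map_step X X.length i _ (by omega)
        (by rw [fval, List.getD_eq_getElem?_getD, ← hkey]; ring)
    | cons t rest =>
      rw [hstk] at hkey
      simp only [Prod.mk.injEq]
      refine ⟨?_, by simp [stkF, List.getD_eq_getElem?_getD, hstk]⟩
      exact map_step X X.length i _ (by omega)
        (by rw [fval, List.getD_eq_getElem?_getD, ← hkey])

-- B's fold invariant
lemma spans2_alt_inv (X : List Int) :
    ∀ i : Nat, i ≤ X.length →
      (List.range i).foldl (stepB X) (List.replicate X.length 0)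
        = (List.range X.length).map (fun k => if k < i then fval X k else 0) := by
  intro i
  induction i with
  | zero =>
    intro _
    simp only [List.range_zero, List.foldl_nil]
    exact replicate_eq_map X.length (fval X)
  | succ i ih =>
    intro hle
    rw [List.range_succ, List.foldl_append, ih (by omega), List.foldl_cons, List.foldl_nil]
    set S := (List.range X.length).map (fun k => if k < i then fval X k else 0) with hSdef
    have hS : ∀ k : Nat, k < i → S.getD k 0 = fval X k := by
      intro k hk
      have hkn : k < X.length := by omega
      rw [hSdef, List.getD_eq_getElem?_getD, List.getElem?_map, List.getElem?_range hkn]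
      simp [hk]
    have hjump := jumpLoop_eq X S (X.getD i 0) i hS (i + 1) ((i : Int) - 1) 1
      (by omega) (by omega) (by omega)
    rw [show ((i : Int) - 1 + 1).toNat = i from by omega] at hjump
    rw [stepB, hjump, hSdef]
    exact map_step X X.length i _ (by omega) (by rw [fval]; ring)

-- ===== VERDICT (by name: the statement is the Claim_ definition above) =====
theorem spans2_spec : Claim_equal_spans2 := by
  intro X _
  unfold Spec_spans2 spans2 spans2_alt
  rw [spans2_inv X X.length le_rfl, spans2_alt_inv X X.length le_rfl]
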